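-- pv_equiv track=rewrite | github.com/PhamDinhDuy-2508/Projecy_PY | APP FEM(PY)/Algorithms.py | getNameofMaterial
-- ===== SOURCE A (Python) =====
-- def token(s) :
--     _char = []
--     _crash = []
--     alphabet = [chr(chnum) for chnum in list (range(ord('a'),ord('z') + 1))]
--     _str = ""
--     for i in alphabet :
--         _str += i
--     _str = _str + "-0123456789"+_str.upper()+"*/+-^()->."
--     while(s) :
--         if s[0] in _str :
--             TakeNumber = s[0]
--             s = s[1:]
--             while(s and s[0] in _str)  :
--                 TakeNumber += s[0]
--                 s = s[1:]
--             _char.append(TakeNumber)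
--             if s :
--                 _crash.append(s[0])
--                 s = s[1:]
--         else :
--             _char.append(s[0])
--             s = s[1:]
--     return _char
--
-- def getString(s) :
--     return token(s)
--
-- def getNameofMaterial(arr , line_count ) :
--     ar = []
--     Arr= []
--     for i in range (len(arr))  :
--         ar.append(getString(arr[i]))
--     for i in range(line_count ) :
--         Arr.append(ar[i][0])
--     return Arr
-- ===== SOURCE B (Python) =====
-- # Simpler: compute each leading token directly (prefix scan), only for the
-- # first line_count strings, instead of fully tokenizing every string.
-- _ALLOWED = "abcdefghijklmnopqrstuvwxyz-0123456789ABCDEFGHIJKLMNOPQRSTUVWXYZ*/+-^()->."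
--
-- def _lead(s):
--     tok = ""
--     for ch in s:
--         if ch not in _ALLOWED:
--             break
--         tok += ch
--     return tok if tok else s[0]
--
-- def getNameofMaterial(arr, line_count):
--     return [_lead(arr[i]) for i in range(line_count)]
-- ===== Notes on version B (the rewrite author's own statement) =====
-- stated objective: faster
-- what changed: B replaces A's full tokenizer (which splits every string entirely into tokens via repeated s=s[1:] slicing and then keeps only each token list's first element) with a single prefix scan per string that computes just the leading token, applied only to the first line_count strings.
import Mathlib
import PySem

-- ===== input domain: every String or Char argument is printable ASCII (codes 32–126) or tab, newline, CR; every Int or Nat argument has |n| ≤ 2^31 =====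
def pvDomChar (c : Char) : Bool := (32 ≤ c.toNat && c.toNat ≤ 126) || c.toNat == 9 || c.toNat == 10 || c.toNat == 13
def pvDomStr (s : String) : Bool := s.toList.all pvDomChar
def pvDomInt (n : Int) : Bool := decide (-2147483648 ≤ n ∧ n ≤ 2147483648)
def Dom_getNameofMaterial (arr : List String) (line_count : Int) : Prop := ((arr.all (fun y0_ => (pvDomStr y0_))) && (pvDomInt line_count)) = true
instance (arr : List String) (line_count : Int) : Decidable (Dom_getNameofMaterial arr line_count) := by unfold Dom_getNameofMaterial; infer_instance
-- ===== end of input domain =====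

-- B computes each leading token directly by a single prefix scan of only the first
-- line_count strings, instead of A's full tokenization (with quadratic slicing) of every string.

-- ===== PORT A =====
-- _str built as in A: lowercase alphabet via range, then "-0123456789", upper(), "*/+-^()->."
def pyAllowed : List Char :=
  let alphabet : List Char :=
    (PySem.List.pyRange 97 123 1).map (fun n => Char.ofNat n.toNat)
  let s := alphabet.foldl (fun acc c => acc ++ [c]) []
  s ++ "-0123456789".toList ++ PySem.Chars.upper s ++ "*/+-^()->.".toList

-- inner while: (TakeNumber, remaining s)
def tokenInner (acc : List Char) : List Char → List Char × List Char
  | [] => (acc, [])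
  | c :: rest => if c ∈ pyAllowed then tokenInner (acc ++ [c]) rest else (acc, c :: rest)

lemma tokenInner_snd_length (acc : List Char) (s : List Char) :
    (tokenInner acc s).2.length ≤ s.length := by
  induction s generalizing acc with
  | nil => simp [tokenInner]
  | cons c rest ih =>
    simp only [tokenInner]
    split
    · exact le_trans (ih _) (by simp)
    · simp

-- outer while(s): _char accumulates tokens, _crash the skipped separators (unused in the result, kept from A)
def tokenGo (s : List Char) (chars : List String) (crash : List Char) : List String :=
  match s with
  | [] => chars
  | c :: rest =>
    if c ∈ pyAllowed then
      if hp : (tokenInner [c] rest).2 = [] then chars ++ [String.mk (tokenInner [c] rest).1]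
      else tokenGo (tokenInner [c] rest).2.tail
        (chars ++ [String.mk (tokenInner [c] rest).1]) (crash ++ [(tokenInner [c] rest).2.head hp])
    else
      tokenGo rest (chars ++ [String.mk [c]]) crash
termination_by s.length
decreasing_by
  · have := tokenInner_snd_length [c] rest
    have ht : (tokenInner [c] rest).2.tail.length < (tokenInner [c] rest).2.length := by
      cases h2 : (tokenInner [c] rest).2 with
      | nil => exact absurd h2 hp
      | cons d s' => simp
    simp only [List.length_cons]
    omega
  · simp

def token (s : String) : List String := tokenGo s.toList [] []

def getString (s : String) : List String := token s

def getNameofMaterial (arr : List String) (line_count : Int) : List String :=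
  let ar : List (List String) :=
    (List.range arr.length).foldl (fun acc i => acc ++ [getString (arr.getD i "")]) []
  (PySem.List.pyRange 0 line_count 1).foldl
    (fun Arr i => Arr ++ [PySem.List.pyGetD (PySem.List.pyGetD ar i []) 0 ""]) []

-- ===== PORT B =====
def allowedB : List Char :=
  "abcdefghijklmnopqrstuvwxyz-0123456789ABCDEFGHIJKLMNOPQRSTUVWXYZ*/+-^()->.".toList

-- for ch in s: if ch not in _ALLOWED: break; tok += ch
def leadGo (tok : List Char) : List Char → List Char
  | [] => tok
  | c :: rest => if c ∈ allowedB then leadGo (tok ++ [c]) rest else tok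

def lead (s : String) : String :=
  let tok := leadGo [] s.toList
  if tok.isEmpty then String.mk [PySem.List.pyGetD s.toList 0 ' '] else String.mk tok

def getNameofMaterial_alt (arr : List String) (line_count : Int) : List String :=
  (PySem.List.pyRange 0 line_count 1).map (fun i => lead (PySem.List.pyGetD arr i ""))

-- ===== PRECONDITION & SPEC =====
-- Pre_ excludes exactly the inputs where A raises IndexError: line_count exceeding
-- len(arr), or an empty string among the first line_count entries (token('') = [],
-- so ar[i][0] raises); B raises there too.
def Pre_getNameofMaterial (arr : List String) (line_count : Int) : Prop :=
  line_count ≤ (arr.length : Int) ∧ ∀ s ∈ arr.take line_count.toNat, s ≠ ""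
instance (arr : List String) (line_count : Int) : Decidable (Pre_getNameofMaterial arr line_count) := by
  unfold Pre_getNameofMaterial; infer_instance

def pvWitness_getNameofMaterial : List String × Int := (["abc def", "  x!", "3.5e2"], 2)

def Spec_getNameofMaterial (arr : List String) (line_count : Int) (out : List String) : Prop := out = getNameofMaterial_alt arr line_count
instance (arr : List String) (line_count : Int) (out : List String) : Decidable (Spec_getNameofMaterial arr line_count out) := by unfold Spec_getNameofMaterial; infer_instance

-- ===== CLAIM (what is proved, stated in full; the proofs are below) =====
def Claim_equal_getNameofMaterial : Prop := ∀ (arr : List String) (line_count : Int), Dom_getNameofMaterial arr line_count → Pre_getNameofMaterial arr line_count → Spec_getNameofMaterial arr line_count (getNameofMaterial arr line_count)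

-- ===== LEMMAS AND PROOFS =====

lemma allowed_eq : pyAllowed = allowedB := by decide

lemma tokenInner_fst (s : List Char) (acc : List Char) :
    (tokenInner acc s).1 = leadGo acc s := by
  induction s generalizing acc with
  | nil => simp [tokenInner, leadGo]
  | cons c rest ih =>
    simp only [tokenInner, leadGo, allowed_eq]
    split
    · exact ih _
    · rfl

lemma leadGo_acc (s : List Char) (acc : List Char) :
    leadGo acc s = acc ++ leadGo [] s := by
  induction s generalizing acc with
  | nil => simp [leadGo]
  | cons c rest ih =>
    simp only [leadGo]
    split
    · rw [ih (acc ++ [c]), ih ([] ++ [c])]; simp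
    · simp

lemma tokenGo_acc (n : Nat) :
    ∀ s : List Char, s.length ≤ n → ∀ chars crash,
      tokenGo s chars crash = chars ++ tokenGo s [] [] := by
  induction n with
  | zero =>
    intro s h chars crash
    have : s = [] := List.eq_nil_of_length_eq_zero (Nat.le_zero.mp h)
    subst this; simp [tokenGo]
  | succ n ih =>
    intro s h chars crash
    match s with
    | [] => simp [tokenGo]
    | c :: rest =>
      rw [tokenGo, tokenGo]
      by_cases hc : c ∈ pyAllowed
      · simp only [hc, if_true]
        have hlen := tokenInner_snd_length [c] rest
        by_cases hp : (tokenInner [c] rest).2 = []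
        · simp [hp]
        · simp only [hp, dite_false]
          have hs' : (tokenInner [c] rest).2.tail.length ≤ n := by
            have ht : (tokenInner [c] rest).2.tail.length + 1 = (tokenInner [c] rest).2.length := by
              cases h2 : (tokenInner [c] rest).2 with
              | nil => exact absurd h2 hp
              | cons d s' => simp
            simp at h; omega
          rw [ih _ hs' (chars ++ _) _, ih _ hs' ([] ++ _) _]
          simp
      · simp only [hc, if_false]
        have hr : rest.length ≤ n := by simp at h; omega
        rw [ih rest hr (chars ++ [String.mk [c]]) crash, ih rest hr ([] ++ [String.mk [c]]) []]
        simp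

-- the first token A extracts from a nonempty string is exactly B's leading token
lemma head_token (c : Char) (rest : List Char) :
    PySem.List.pyGetD (tokenGo (c :: rest) [] []) 0 ""
      = (if (leadGo [] (c :: rest)).isEmpty
          then String.mk [PySem.List.pyGetD (c :: rest) 0 ' ']
          else String.mk (leadGo [] (c :: rest))) := by
  rw [tokenGo]
  by_cases hc : c ∈ pyAllowed
  · simp only [hc, if_true]
    have hne : (leadGo [] (c :: rest)).isEmpty = false := by
      simp only [leadGo, ← allowed_eq, hc, if_true]
      rw [leadGo_acc]; simp
    have htok : (tokenInner [c] rest).1 = leadGo [] (c :: rest) := by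
      rw [tokenInner_fst]
      simp only [leadGo, ← allowed_eq, hc, if_true, List.nil_append]
    by_cases hp : (tokenInner [c] rest).2 = []
    · simp [hp, hne, htok, PySem.List.pyGetD_zero_cons]
    · simp only [hp, dite_false]
      rw [tokenGo_acc (tokenInner [c] rest).2.tail.length _ le_rfl]
      simp [hne, htok, PySem.List.pyGetD_zero_cons]
  · simp only [hc, if_false]
    rw [tokenGo_acc rest.length rest le_rfl]
    have hz : (leadGo [] (c :: rest)).isEmpty = true := by
      simp [leadGo, ← allowed_eq, hc]
    simp [hz, PySem.List.pyGetD_zero_cons]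

lemma ar_eq (arr : List String) :
    (List.range arr.length).foldl (fun acc i => acc ++ [getString (arr.getD i "")]) []
      = arr.map getString := by
  rw [PySem.List.foldl_append_singleton_eq_map, List.nil_append]
  apply List.ext_getElem (by simp)
  intro k h1 h2
  simp at h1
  simp [List.getD_eq_getElem?_getD, List.getElem?_eq_getElem h1]

-- ===== VERDICT (by name: the statement is the Claim_ definition above) =====
theorem getNameofMaterial_spec : Claim_equal_getNameofMaterial := by
  intro arr line_count _hdom hpre
  obtain ⟨hlen, hne⟩ := hpre
  unfold Spec_getNameofMaterial getNameofMaterial getNameofMaterial_alt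
  rw [ar_eq, PySem.List.foldl_append_singleton_eq_map, List.nil_append]
  apply List.map_congr_left
  intro i hi
  rw [PySem.List.mem_pyRange_one] at hi
  obtain ⟨hi0, hilt⟩ := hi
  have hlt : i.toNat < arr.length := by omega
  have hi' : i = (i.toNat : Int) := by omega
  rw [hi', PySem.List.pyGetD_natCast, PySem.List.pyGetD_natCast]
  have h1 : (arr.map getString).getD i.toNat [] = getString arr[i.toNat] := by
    simp [List.getD_eq_getElem?_getD, hlt]
  have h2 : arr.getD i.toNat "" = arr[i.toNat] := by
    simp [List.getD_eq_getElem?_getD, List.getElem?_eq_getElem hlt]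
  rw [h1, h2]
  have hmem : arr[i.toNat] ∈ arr.take line_count.toNat :=
    List.mem_take_iff_getElem.mpr ⟨i.toNat, by omega, by simp⟩
  have hnz : arr[i.toNat] ≠ "" := hne _ hmem
  have hcl : arr[i.toNat].toList ≠ [] := by
    intro h; exact hnz (String.toList_eq_nil_iff.mp h)
  cases hl : arr[i.toNat].toList with
  | nil => exact absurd hl hcl
  | cons c rest =>
    show PySem.List.pyGetD (getString arr[i.toNat]) 0 "" = lead arr[i.toNat]
    unfold getString token lead
    rw [hl, head_token]
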